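-- pv_equiv track=rewrite | github.com/iglesiojunior/beecrownd | criptografia.py | deslocamento_metade_frase
-- ===== SOURCE A (Python) =====
-- def deslocamento_metade_frase(mensagem):
--     resultado_mensagem = ''
--     for i in range(0, len(mensagem)):
--             codigo_dois = ord(mensagem[i])
--             if(i >= len(mensagem)//2):
--                 codigo_dois -= 1
--                 resultado_mensagem += chr(codigo_dois)
--             else:
--                 resultado_mensagem += chr(codigo_dois)
--     return resultado_mensagem
-- ===== SOURCE B (Python) =====
-- def deslocamento_metade_frase(mensagem):
--     meio = len(mensagem) // 2
--     return mensagem[:meio] + ''.join(chr(ord(c) - 1) for c in mensagem[meio:])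
-- ===== Notes on version B (the rewrite author's own statement) =====
-- stated objective: simpler
-- what changed: Replaces the indexed loop with a per-index midpoint branch by computing the midpoint once, keeping the first half as an untouched slice and mapping the decrement only over the second slice (also avoids repeated string concatenation).
import Mathlib
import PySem

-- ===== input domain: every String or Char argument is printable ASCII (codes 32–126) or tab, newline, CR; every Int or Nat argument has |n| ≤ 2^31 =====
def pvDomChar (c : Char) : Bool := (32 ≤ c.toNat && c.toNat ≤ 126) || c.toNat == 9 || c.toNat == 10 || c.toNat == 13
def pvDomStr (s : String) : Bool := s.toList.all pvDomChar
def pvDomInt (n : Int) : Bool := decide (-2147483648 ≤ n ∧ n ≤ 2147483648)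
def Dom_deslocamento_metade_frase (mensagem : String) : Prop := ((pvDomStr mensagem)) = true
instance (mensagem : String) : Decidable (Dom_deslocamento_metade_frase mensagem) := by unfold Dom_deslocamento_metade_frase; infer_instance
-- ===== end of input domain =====

-- B keeps the first half as an untouched slice and maps the decrement only over the second slice (objective: simpler).

-- ===== PORT A =====
-- literal port of A: loop i over range(0, len(mensagem)), append chr(ord(mensagem[i]) - 1)
-- when i >= len//2, else the unchanged character; string indexing via pyGetD on the char list
def deslocamento_metade_frase (mensagem : String) : String :=
  let l := mensagem.toList
  let n : Int := l.length
  String.ofList ((PySem.List.pyRange 0 n 1).foldl (fun acc i =>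
    let codigo_dois := (PySem.List.pyGetD l i ' ').toNat
    if i ≥ PySem.Int.floordiv n 2 then acc ++ [Char.ofNat (codigo_dois - 1)]
    else acc ++ [Char.ofNat codigo_dois]) [])

-- ===== PORT B =====
-- port of B: midpoint once, take the first half unchanged, map the decrement over the rest
def deslocamento_metade_frase_alt (mensagem : String) : String :=
  let l := mensagem.toList
  let meio := l.length / 2
  String.ofList (l.take meio ++ (l.drop meio).map (fun c => Char.ofNat (c.toNat - 1)))

-- ===== PRECONDITION & SPEC =====
def Spec_deslocamento_metade_frase (mensagem : String) (out : String) : Prop := out = deslocamento_metade_frase_alt mensagem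
instance (mensagem : String) (out : String) : Decidable (Spec_deslocamento_metade_frase mensagem out) := by unfold Spec_deslocamento_metade_frase; infer_instance

-- ===== CLAIM (what is proved, stated in full; the proofs are below) =====
def Claim_equal_deslocamento_metade_frase : Prop := ∀ (mensagem : String), Dom_deslocamento_metade_frase mensagem → Spec_deslocamento_metade_frase mensagem (deslocamento_metade_frase mensagem)

-- ===== LEMMAS AND PROOFS =====

-- the first-half loop iterations reproduce the prefix unchanged
lemma first_half_map (l : List Char) :
    (PySem.List.pyRange 0 (l.length / 2 : Nat) 1).map
      (fun i => Char.ofNat (PySem.List.pyGetD l i ' ').toNat) = l.take (l.length / 2) := by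
  have hle : l.length / 2 ≤ l.length := Nat.div_le_self _ _
  have hlen : (l.take (l.length / 2)).length = l.length / 2 := by
    simp [List.length_take, Nat.min_eq_left hle]
  have hget : ∀ i ∈ PySem.List.pyRange 0 (l.length / 2 : Nat) 1,
      Char.ofNat (PySem.List.pyGetD l i ' ').toNat
        = PySem.List.pyGetD (l.take (l.length / 2)) i ' ' := by
    intro i hi
    rw [PySem.List.mem_pyRange_one] at hi
    obtain ⟨h0, h1⟩ := hi
    have hk : i.toNat < l.length / 2 := by omega
    have hkl : i.toNat < l.length := by omega
    rw [show i = (i.toNat : Int) by omega, PySem.List.pyGetD_natCast,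
      PySem.List.pyGetD_natCast,
      List.getD_eq_getElem l ' ' hkl,
      List.getD_eq_getElem (l.take (l.length / 2)) ' ' (by omega)]
    simp [List.getElem_take, Char.ofNat_toNat]
  calc (PySem.List.pyRange 0 (l.length / 2 : Nat) 1).map
        (fun i => Char.ofNat (PySem.List.pyGetD l i ' ').toNat)
      = (PySem.List.pyRange 0 (l.length / 2 : Nat) 1).map
        (fun i => PySem.List.pyGetD (l.take (l.length / 2)) i ' ') := List.map_congr_left hget
    _ = l.take (l.length / 2) := by
        have := PySem.List.map_pyGetD_pyRange_zero' (l.take (l.length / 2)) ' '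
        rwa [hlen] at this

lemma second_half_map (l : List Char) :
    (PySem.List.pyRange (l.length / 2 : Nat) (l.length : Nat) 1).map
      (fun i => Char.ofNat ((PySem.List.pyGetD l i ' ').toNat - 1))
      = (l.drop (l.length / 2)).map (fun c => Char.ofNat (c.toNat - 1)) := by
  have h := PySem.List.map_pyGetD_pyRange' l ' ' (a := ((l.length / 2 : Nat) : Int)) (by positivity)
  rw [show (((l.length / 2 : Nat) : Int)).toNat = l.length / 2 by omega] at h
  calc (PySem.List.pyRange (l.length / 2 : Nat) (l.length : Nat) 1).map
        (fun i => Char.ofNat ((PySem.List.pyGetD l i ' ').toNat - 1))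
      = ((PySem.List.pyRange (l.length / 2 : Nat) (l.length : Nat) 1).map
          (fun i => PySem.List.pyGetD l i ' ')).map (fun c => Char.ofNat (c.toNat - 1)) := by
        rw [List.map_map]
        simp [Function.comp_def]
    _ = (l.drop (l.length / 2)).map (fun c => Char.ofNat (c.toNat - 1)) := by
        rw [h]

-- ===== VERDICT (by name: the statement is the Claim_ definition above) =====
theorem deslocamento_metade_frase_spec : Claim_equal_deslocamento_metade_frase := by
  intro mensagem _
  unfold Spec_deslocamento_metade_frase deslocamento_metade_frase deslocamento_metade_frase_alt
  set l := mensagem.toList with hl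
  simp only []
  congr 1
  rw [show (fun (acc : List Char) (i : Int) =>
        if i ≥ PySem.Int.floordiv (l.length : Int) 2 then
          acc ++ [Char.ofNat ((PySem.List.pyGetD l i ' ').toNat - 1)]
        else acc ++ [Char.ofNat (PySem.List.pyGetD l i ' ').toNat])
      = fun acc i => acc ++ [if i ≥ PySem.Int.floordiv (l.length : Int) 2 then
          Char.ofNat ((PySem.List.pyGetD l i ' ').toNat - 1)
        else Char.ofNat (PySem.List.pyGetD l i ' ').toNat] from by
        funext acc i; split <;> rfl]
  rw [PySem.List.foldl_append_singleton_eq_map, List.nil_append]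
  have hfd : PySem.Int.floordiv (l.length : Int) 2 = ((l.length / 2 : Nat) : Int) := by
    rw [PySem.Int.floordiv_eq_ediv_of_pos (by omega)]
    omega
  have hsplit : PySem.List.pyRange 0 (l.length : Int) 1
      = PySem.List.pyRange 0 ((l.length / 2 : Nat) : Int) 1
        ++ PySem.List.pyRange ((l.length / 2 : Nat) : Int) (l.length : Int) 1 :=
    PySem.List.pyRange_one_append _ _ _ (by positivity) (by
      have := Nat.div_le_self l.length 2; omega)
  rw [hsplit, List.map_append]
  congr 1
  · rw [← first_half_map l]
    apply List.map_congr_left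
    intro i hi
    rw [PySem.List.mem_pyRange_one] at hi
    rw [hfd]
    simp only [if_neg (by omega : ¬ i ≥ ((l.length / 2 : Nat) : Int))]
  · rw [← second_half_map l]
    apply List.map_congr_left
    intro i hi
    rw [PySem.List.mem_pyRange_one] at hi
    rw [hfd]
    simp only [if_pos (by omega : i ≥ ((l.length / 2 : Nat) : Int))]
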